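-- pv_equiv track=rewrite | github.com/BanibrataChatterjee/AwesomeSalesforceSkills | skills/flow/flow-action-framework/scripts/check_flow_action_framework.py | _strip_trailing_line_comments
-- ===== SOURCE A (Python) =====
-- def _strip_trailing_line_comments(line: str) -> str:
--     in_sq = in_dq = False
--     i = 0
--     while i < len(line):
--         ch = line[i]
--         if ch == "'" and not in_dq:
--             in_sq = not in_sq
--         elif ch == '"' and not in_sq:
--             in_dq = not in_dq
--         elif ch == "/" and i + 1 < len(line) and line[i + 1] == "/" and not in_sq and not in_dq:
--             return line[:i].rstrip()
--         i += 1
--     return line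
-- ===== SOURCE B (Python) =====
-- def _strip_trailing_line_comments(line: str) -> str:
--     # Skip-ahead scanner: jump between interesting tokens with str.find
--     # instead of stepping over every character.
--     pos = 0
--     while True:
--         isq = line.find("'", pos)
--         idq = line.find('"', pos)
--         icm = line.find("//", pos)
--         cands = [x for x in (isq, idq, icm) if x != -1]
--         if not cands:
--             return line
--         m = min(cands)
--         if m == icm:
--             return line[:m].rstrip()
--         q = "'" if m == isq else '"'
--         end = line.find(q, m + 1)
--         if end == -1:
--             return line
--         pos = end + 1
-- ===== Notes on version B (the rewrite author's own statement) =====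
-- stated objective: faster
-- what changed: Replaced A's per-character quote-state machine with a skip-ahead scanner that jumps between the next ', " and // tokens via str.find and skips whole quoted spans at once.
import Mathlib
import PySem

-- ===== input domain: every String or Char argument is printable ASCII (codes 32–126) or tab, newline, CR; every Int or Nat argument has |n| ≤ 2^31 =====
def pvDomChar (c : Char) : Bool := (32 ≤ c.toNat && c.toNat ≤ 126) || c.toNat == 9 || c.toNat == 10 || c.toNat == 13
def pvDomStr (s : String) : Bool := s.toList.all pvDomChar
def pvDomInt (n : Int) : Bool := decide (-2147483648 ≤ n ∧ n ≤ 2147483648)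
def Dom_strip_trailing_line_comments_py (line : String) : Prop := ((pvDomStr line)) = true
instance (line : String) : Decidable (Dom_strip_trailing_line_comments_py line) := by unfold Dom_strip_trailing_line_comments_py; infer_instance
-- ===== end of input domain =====

-- B replaces A's per-character quote-state machine by a skip-ahead scanner that jumps
-- between quote/'//' tokens with find, skipping quoted spans whole (objective: faster,
-- measured; same O(n) asymptotics).

-- ===== PORT A =====
-- literal port of A's while-loop: index i plus the unscanned suffix rest = cs.drop i
-- (the current character line[i] is rest's head; 'i+1 < len and line[i+1] == "/"' is
-- rest.tail.head? = some '/'); flags in_sq/in_dq as in A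
def pvStripALoop (cs : List Char) (sq dq : Bool) (i : Nat) : (rest : List Char) → List Char
  | [] => cs
  | ch :: rest =>
      if ch = '\'' ∧ dq = false then pvStripALoop cs (!sq) dq (i+1) rest
      else if ch = '"' ∧ sq = false then pvStripALoop cs sq (!dq) (i+1) rest
      else if ch = '/' ∧ rest.head? = some '/' ∧ sq = false ∧ dq = false then
        PySem.Chars.rstrip (cs.take i)
      else pvStripALoop cs sq dq (i+1) rest

def strip_trailing_line_comments_py (line : String) : String :=
  String.ofList (pvStripALoop line.toList false false 0 line.toList)

-- ===== PORT B =====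
-- hand port of line.find(c, pos) for a single-character needle (exact for pos ≤ len):
-- scans the suffix rest = cs.drop idx, returns the absolute index (none = Python's -1)
def pvFindCh (c : Char) : (rest : List Char) → (idx : Nat) → Option Nat
  | [], _ => none
  | x :: rest, idx => if x = c then some idx else pvFindCh c rest (idx+1)

-- hand port of line.find("//", pos) (exact for pos ≤ len): first absolute index idx
-- with rest = cs.drop idx starting with two slashes
def pvFindSS : (rest : List Char) → (idx : Nat) → Option Nat
  | [], _ => none
  | x :: rest, idx =>
      if x = '/' ∧ rest.head? = some '/' then some idx else pvFindSS rest (idx+1)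

-- B's main loop: jump to the earliest of ', ", "//" at or after pos.  The cursor
-- advances by at least one character per iteration, so a fuel counter of
-- cs.length + 1 (a totality guard only, proved never to run out in pvB_eq_A)
-- makes the recursion structural.
def pvStripBGo (cs : List Char) : Nat → Nat → List Char
  | 0, _ => cs
  | n+1, pos =>
    match ([pvFindCh '\'' (cs.drop pos) pos, pvFindCh '"' (cs.drop pos) pos,
            pvFindSS (cs.drop pos) pos].filterMap id).min? with
    | none => cs
    | some m =>
      if pvFindSS (cs.drop pos) pos = some m then PySem.Chars.rstrip (cs.take m)
      else
        match pvFindCh (if pvFindCh '\'' (cs.drop pos) pos = some m then '\'' else '"')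
                (cs.drop (m+1)) (m+1) with
        | none => cs
        | some e => pvStripBGo cs n (e+1)

def pvStripBLoop (cs : List Char) (pos : Nat) : List Char :=
  pvStripBGo cs (cs.length + 1) pos

def strip_trailing_line_comments_py_alt (line : String) : String :=
  String.ofList (pvStripBLoop line.toList 0)

-- ===== PRECONDITION & SPEC =====
def Spec_strip_trailing_line_comments_py (line : String) (out : String) : Prop := out = strip_trailing_line_comments_py_alt line
instance (line : String) (out : String) : Decidable (Spec_strip_trailing_line_comments_py line out) := by unfold Spec_strip_trailing_line_comments_py; infer_instance

-- ===== CLAIM (what is proved, stated in full; the proofs are below) =====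
def Claim_equal_strip_trailing_line_comments_py : Prop := ∀ (line : String), Dom_strip_trailing_line_comments_py line → Spec_strip_trailing_line_comments_py line (strip_trailing_line_comments_py line)

-- ===== LEMMAS AND PROOFS =====

-- full characterisation of the finds, in absolute indices
theorem pvFindCh_some_rel (c : Char) : ∀ (rest : List Char) (idx e : Nat),
    pvFindCh c rest idx = some e →
    idx ≤ e ∧ e - idx < rest.length ∧ rest[e-idx]? = some c ∧
      ∀ k, k < e - idx → rest[k]? ≠ some c := by
  intro rest
  induction rest with
  | nil => intro idx e h; simp [pvFindCh] at h
  | cons x rest ih =>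
    intro idx e h
    rw [pvFindCh] at h
    split at h
    next hx =>
      cases h
      exact ⟨le_refl _, by simp, by simp [hx], fun k hk => by omega⟩
    next hx =>
      obtain ⟨h1, h2, h3, h4⟩ := ih (idx+1) e h
      refine ⟨by omega, by simp only [List.length_cons]; omega, ?_, ?_⟩
      · have he : e - idx = (e - (idx+1)) + 1 := by omega
        rw [he, List.getElem?_cons_succ]; exact h3
      · intro k hk
        cases k with
        | zero => simpa using hx
        | succ k => rw [List.getElem?_cons_succ]; exact h4 k (by omega)

theorem pvFindCh_none_rel (c : Char) : ∀ (rest : List Char) (idx : Nat),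
    pvFindCh c rest idx = none → ∀ k : Nat, rest[k]? ≠ some c := by
  intro rest
  induction rest with
  | nil => intro idx h k; simp
  | cons x rest ih =>
    intro idx h k
    rw [pvFindCh] at h
    split at h
    · simp at h
    next hx =>
      cases k with
      | zero => simpa using hx
      | succ k => rw [List.getElem?_cons_succ]; exact ih (idx+1) h k

theorem pvFindSS_some_rel : ∀ (rest : List Char) (idx e : Nat),
    pvFindSS rest idx = some e →
    idx ≤ e ∧ e - idx < rest.length ∧ (rest[e-idx]? = some '/' ∧ rest[e-idx+1]? = some '/') ∧
      ∀ k, k < e - idx → ¬(rest[k]? = some '/' ∧ rest[k+1]? = some '/') := by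
  intro rest
  induction rest with
  | nil => intro idx e h; simp [pvFindSS] at h
  | cons x rest ih =>
    intro idx e h
    rw [pvFindSS] at h
    split at h
    next hx =>
      cases h
      refine ⟨le_refl _, by simp, ⟨by simp [hx.1], ?_⟩, fun k hk => by omega⟩
      · simpa [List.head?_eq_getElem?] using hx.2
    next hx =>
      obtain ⟨h1, h2, h3, h4⟩ := ih (idx+1) e h
      refine ⟨by omega, by simp only [List.length_cons]; omega, ?_, ?_⟩
      · have he : e - idx = (e - (idx+1)) + 1 := by omega
        rw [he, List.getElem?_cons_succ, show e - (idx+1) + 1 + 1 = (e - (idx+1) + 1) + 1 from rfl,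
            List.getElem?_cons_succ]
        exact h3
      · intro k hk
        cases k with
        | zero =>
          simp only [List.getElem?_cons_zero, List.getElem?_cons_succ, Option.some.injEq]
          intro hc
          exact hx ⟨hc.1, by rw [List.head?_eq_getElem?]; exact hc.2⟩
        | succ k =>
          rw [List.getElem?_cons_succ, List.getElem?_cons_succ]
          exact h4 k (by omega)

theorem pvFindSS_none_rel : ∀ (rest : List Char) (idx : Nat),
    pvFindSS rest idx = none → ∀ k : Nat, ¬(rest[k]? = some '/' ∧ rest[k+1]? = some '/') := by
  intro rest
  induction rest with
  | nil => intro idx h k; simp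
  | cons x rest ih =>
    intro idx h k
    rw [pvFindSS] at h
    split at h
    · simp at h
    next hx =>
      cases k with
      | zero =>
        simp only [List.getElem?_cons_zero, List.getElem?_cons_succ, Option.some.injEq]
        intro hc
        exact hx ⟨hc.1, by rw [List.head?_eq_getElem?]; exact hc.2⟩
      | succ k =>
        rw [List.getElem?_cons_succ, List.getElem?_cons_succ]
        exact ih (idx+1) h k

-- absolute-index corollaries for finds launched at suffix cs.drop pos
theorem pvFindChA_some {cs : List Char} {c : Char} {pos e : Nat}
    (h : pvFindCh c (cs.drop pos) pos = some e) :
    pos ≤ e ∧ e < cs.length ∧ cs[e]? = some c ∧ ∀ i, pos ≤ i → i < e → cs[i]? ≠ some c := by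
  obtain ⟨h1, h2, h3, h4⟩ := pvFindCh_some_rel c _ pos e h
  rw [List.length_drop] at h2
  rw [List.getElem?_drop, show pos + (e - pos) = e from by omega] at h3
  refine ⟨h1, by omega, h3, ?_⟩
  intro i hi hie
  have := h4 (i - pos) (by omega)
  rwa [List.getElem?_drop, show pos + (i - pos) = i from by omega] at this

theorem pvFindChA_none {cs : List Char} {c : Char} {pos : Nat}
    (h : pvFindCh c (cs.drop pos) pos = none) :
    ∀ i, pos ≤ i → cs[i]? ≠ some c := by
  intro i hi
  have := pvFindCh_none_rel c _ pos h (i - pos)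
  rwa [List.getElem?_drop, show pos + (i - pos) = i from by omega] at this

theorem pvFindSSA_some {cs : List Char} {pos e : Nat}
    (h : pvFindSS (cs.drop pos) pos = some e) :
    pos ≤ e ∧ e < cs.length ∧ (cs[e]? = some '/' ∧ cs[e+1]? = some '/') ∧
      ∀ i, pos ≤ i → i < e → ¬(cs[i]? = some '/' ∧ cs[i+1]? = some '/') := by
  obtain ⟨h1, h2, ⟨h3a, h3b⟩, h4⟩ := pvFindSS_some_rel _ pos e h
  rw [List.length_drop] at h2
  rw [List.getElem?_drop, show pos + (e - pos) = e from by omega] at h3a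
  rw [List.getElem?_drop, show pos + (e - pos + 1) = e + 1 from by omega] at h3b
  refine ⟨h1, by omega, ⟨h3a, h3b⟩, ?_⟩
  intro i hi hie
  have := h4 (i - pos) (by omega)
  rwa [List.getElem?_drop, show pos + (i - pos) = i from by omega,
       List.getElem?_drop, show pos + (i - pos + 1) = i + 1 from by omega] at this

theorem pvFindSSA_none {cs : List Char} {pos : Nat}
    (h : pvFindSS (cs.drop pos) pos = none) :
    ∀ i, pos ≤ i → ¬(cs[i]? = some '/' ∧ cs[i+1]? = some '/') := by
  intro i hi
  have := pvFindSS_none_rel _ pos h (i - pos)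
  rwa [List.getElem?_drop, show pos + (i - pos) = i from by omega,
       List.getElem?_drop, show pos + (i - pos + 1) = i + 1 from by omega] at this

-- member of the min of the candidate list is one of the three finds
theorem pvMin_mem {a b c : Option Nat} {m : Nat}
    (h : ([a, b, c].filterMap id).min? = some m) :
    (a = some m ∨ b = some m ∨ c = some m) := by
  rcases a with _ | av <;> rcases b with _ | bv <;> rcases c with _ | cv <;>
    simp [List.filterMap, List.min?, Nat.min_def] at h ⊢ <;>
    first | omega | (split_ifs at h <;> omega)

-- the minimum is a lower bound on each candidate
theorem pvMin_le {a b c : Option Nat} {m v : Nat}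
    (h : ([a, b, c].filterMap id).min? = some m)
    (hv : a = some v ∨ b = some v ∨ c = some v) : m ≤ v := by
  rcases a with _ | av <;> rcases b with _ | bv <;> rcases c with _ | cv <;>
    simp [List.filterMap, List.min?, Nat.min_def] at h hv <;>
    first | omega | (split_ifs at h <;> omega)

-- unfolding cs.drop i one character when i < cs.length
theorem pvDrop_cons {cs : List Char} {i : Nat} (h : i < cs.length) :
    cs.drop i = cs[i] :: cs.drop (i+1) := List.drop_eq_getElem_cons h

theorem pvDrop_nil {cs : List Char} {i : Nat} (h : ¬ i < cs.length) :
    cs.drop i = [] := List.drop_eq_nil_of_le (by omega)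

-- a position is "interesting" to A's normal state if it is a quote or starts "//"
def pvInterest (cs : List Char) (i : Nat) : Prop :=
  cs[i]? = some '\'' ∨ cs[i]? = some '"' ∨ (cs[i]? = some '/' ∧ cs[i+1]? = some '/')

-- A in normal state steps silently over uninteresting positions
theorem pvA_skip : ∀ n (cs : List Char) pos m, m - pos ≤ n → pos ≤ m →
    (∀ i, pos ≤ i → i < m → ¬ pvInterest cs i) →
    pvStripALoop cs false false pos (cs.drop pos) = pvStripALoop cs false false m (cs.drop m) := by
  intro n
  induction n with
  | zero =>
    intro cs pos m hn hpm hno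
    have : pos = m := by omega
    rw [this]
  | succ n ih =>
    intro cs pos m hn hpm hno
    rcases Nat.eq_or_lt_of_le hpm with rfl | hlt
    · rfl
    by_cases hp : pos < cs.length
    · have hni := hno pos (le_refl _) hlt
      have hgp : cs[pos]? = some cs[pos] := List.getElem?_eq_getElem hp
      rw [pvDrop_cons hp, pvStripALoop,
          if_neg (fun hc => hni (Or.inl (by rw [hgp, hc.1]))),
          if_neg (fun hc => hni (Or.inr (Or.inl (by rw [hgp, hc.1])))),
          if_neg (fun hc => hni (Or.inr (Or.inr ⟨by rw [hgp, hc.1],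
            by rw [← List.head?_drop]; exact hc.2.1⟩)))]
      exact ih cs (pos+1) m (by omega) (by omega) (fun i hi him => hno i (by omega) him)
    · rw [pvDrop_nil hp, pvDrop_nil (by omega), pvStripALoop, pvStripALoop]

-- A in normal state with nothing interesting left returns the whole line
theorem pvA_end : ∀ n (cs : List Char) pos, cs.length - pos ≤ n →
    (∀ i, pos ≤ i → ¬ pvInterest cs i) →
    pvStripALoop cs false false pos (cs.drop pos) = cs := by
  intro n
  induction n with
  | zero =>
    intro cs pos hn hno
    rw [pvDrop_nil (by omega), pvStripALoop]
  | succ n ih =>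
    intro cs pos hn hno
    by_cases hp : pos < cs.length
    · have hni := hno pos (le_refl _)
      have hgp : cs[pos]? = some cs[pos] := List.getElem?_eq_getElem hp
      rw [pvDrop_cons hp, pvStripALoop,
          if_neg (fun hc => hni (Or.inl (by rw [hgp, hc.1]))),
          if_neg (fun hc => hni (Or.inr (Or.inl (by rw [hgp, hc.1])))),
          if_neg (fun hc => hni (Or.inr (Or.inr ⟨by rw [hgp, hc.1],
            by rw [← List.head?_drop]; exact hc.2.1⟩)))]
      exact ih cs (pos+1) (by omega) (fun i hi => hno i (by omega))
    · rw [pvDrop_nil hp, pvStripALoop]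

-- in a single-quoted string A scans to the closing quote (or the end)
theorem pvA_sq : ∀ n (cs : List Char) i, cs.length - i ≤ n →
    pvStripALoop cs true false i (cs.drop i) =
      (match pvFindCh '\'' (cs.drop i) i with
       | none => cs
       | some e => pvStripALoop cs false false (e+1) (cs.drop (e+1))) := by
  intro n
  induction n with
  | zero =>
    intro cs i hn
    rw [pvDrop_nil (by omega), pvStripALoop, pvFindCh]
  | succ n ih =>
    intro cs i hn
    by_cases h : i < cs.length
    · rw [pvDrop_cons h, pvStripALoop, pvFindCh]
      by_cases hq : cs[i] = '\''
      · rw [if_pos ⟨hq, rfl⟩, if_pos hq]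
        rfl
      · rw [if_neg (fun hc => hq hc.1), if_neg hq,
            if_neg (fun hc => Bool.noConfusion hc.2),
            if_neg (fun hc => Bool.noConfusion hc.2.2.1)]
        exact ih cs (i+1) (by omega)
    · rw [pvDrop_nil h, pvStripALoop, pvFindCh]

theorem pvA_dq : ∀ n (cs : List Char) i, cs.length - i ≤ n →
    pvStripALoop cs false true i (cs.drop i) =
      (match pvFindCh '"' (cs.drop i) i with
       | none => cs
       | some e => pvStripALoop cs false false (e+1) (cs.drop (e+1))) := by
  intro n
  induction n with
  | zero =>
    intro cs i hn
    rw [pvDrop_nil (by omega), pvStripALoop, pvFindCh]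
  | succ n ih =>
    intro cs i hn
    by_cases h : i < cs.length
    · rw [pvDrop_cons h, pvStripALoop, pvFindCh]
      by_cases hq : cs[i] = '"'
      · rw [if_neg (fun hc => Bool.noConfusion hc.2), if_pos ⟨hq, rfl⟩, if_pos hq]
        rfl
      · rw [if_neg (fun hc => Bool.noConfusion hc.2), if_neg (fun hc => hq hc.1), if_neg hq,
            if_neg (fun hc => Bool.noConfusion hc.2.2.2)]
        exact ih cs (i+1) (by omega)
    · rw [pvDrop_nil h, pvStripALoop, pvFindCh]

-- A's single step at an interesting position in the normal state
theorem pvA_at_sq (cs : List Char) (m : Nat) (hm : m < cs.length) (hch : cs[m] = '\'') :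
    pvStripALoop cs false false m (cs.drop m) = pvStripALoop cs true false (m+1) (cs.drop (m+1)) := by
  rw [pvDrop_cons hm, pvStripALoop, if_pos ⟨hch, rfl⟩]; rfl

theorem pvA_at_dq (cs : List Char) (m : Nat) (hm : m < cs.length) (hch : cs[m] = '"') :
    pvStripALoop cs false false m (cs.drop m) = pvStripALoop cs false true (m+1) (cs.drop (m+1)) := by
  have h1 : ¬(cs[m] = '\'' ∧ (false : Bool) = false) := by
    rintro ⟨h, -⟩; rw [hch] at h; exact absurd h (by decide)
  rw [pvDrop_cons hm, pvStripALoop, if_neg h1, if_pos ⟨hch, rfl⟩]; rfl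

theorem pvA_at_cm (cs : List Char) (m : Nat) (hm : m < cs.length) (hch : cs[m] = '/')
    (h2 : cs[m+1]? = some '/') :
    pvStripALoop cs false false m (cs.drop m) = PySem.Chars.rstrip (cs.take m) := by
  have h1 : ¬(cs[m] = '\'' ∧ (false : Bool) = false) := by
    rintro ⟨h, -⟩; rw [hch] at h; exact absurd h (by decide)
  have h2' : ¬(cs[m] = '"' ∧ (false : Bool) = false) := by
    rintro ⟨h, -⟩; rw [hch] at h; exact absurd h (by decide)
  rw [pvDrop_cons hm, pvStripALoop, if_neg h1, if_neg h2',
      if_pos ⟨hch, by rw [← List.head?_drop] at h2; exact h2, rfl, rfl⟩]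

theorem pvB_eq_A : ∀ n (cs : List Char) pos, cs.length - pos < n →
    pvStripBGo cs n pos = pvStripALoop cs false false pos (cs.drop pos) := by
  intro n
  induction n with
  | zero =>
    intro cs pos hn
    omega
  | succ n ih =>
    intro cs pos hn
    rw [pvStripBGo]
    split
    next hm =>
      -- no candidate: all three finds are none, A runs to the end
      have hall : ∀ i, pos ≤ i → ¬ pvInterest cs i := by
        rcases h1 : pvFindCh '\'' (cs.drop pos) pos with _ | v
        · rcases h2 : pvFindCh '"' (cs.drop pos) pos with _ | v
          · rcases h3 : pvFindSS (cs.drop pos) pos with _ | v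
            · intro i hi hint
              rcases hint with hq | hq | hq
              · exact pvFindChA_none h1 i hi hq
              · exact pvFindChA_none h2 i hi hq
              · exact pvFindSSA_none h3 i hi hq
            · rw [h1, h2, h3] at hm; simp [List.filterMap, List.min?] at hm
          · rw [h1, h2] at hm; simp [List.filterMap, List.min?] at hm
        · rw [h1] at hm; simp [List.filterMap, List.min?] at hm
      exact (pvA_end (cs.length - pos) cs pos (le_refl _) hall).symm
    next m hm =>
      -- m is the earliest interesting position; A skips silently up to m
      have hno : ∀ i, pos ≤ i → i < m → ¬ pvInterest cs i := by
        intro i hi him hint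
        rcases hint with hq | hq | hq
        · rcases h1 : pvFindCh '\'' (cs.drop pos) pos with _ | v
          · exact pvFindChA_none h1 i hi hq
          · have hsp := pvFindChA_some h1
            have hle := pvMin_le hm (Or.inl h1)
            exact hsp.2.2.2 i hi (by omega) hq
        · rcases h1 : pvFindCh '"' (cs.drop pos) pos with _ | v
          · exact pvFindChA_none h1 i hi hq
          · have hsp := pvFindChA_some h1
            have hle := pvMin_le hm (Or.inr (Or.inl h1))
            exact hsp.2.2.2 i hi (by omega) hq
        · rcases h1 : pvFindSS (cs.drop pos) pos with _ | v
          · exact pvFindSSA_none h1 i hi hq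
          · have hsp := pvFindSSA_some h1
            have hle := pvMin_le hm (Or.inr (Or.inr h1))
            exact hsp.2.2.2 i hi (by omega) hq
      have hposm : pos ≤ m ∧ m < cs.length := by
        rcases pvMin_mem hm with h | h | h
        · have := pvFindChA_some h; exact ⟨this.1, this.2.1⟩
        · have := pvFindChA_some h; exact ⟨this.1, this.2.1⟩
        · have := pvFindSSA_some h; exact ⟨this.1, this.2.1⟩
      rw [pvA_skip (m - pos) cs pos m (le_refl _) hposm.1 hno]
      split
      next hcm =>
        -- "//" is earliest: A stops at m with the comment branch
        obtain ⟨-, hmlen, ⟨hs1, hs2⟩, -⟩ := pvFindSSA_some hcm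
        have hcm' : cs[m] = '/' := by
          rw [List.getElem?_eq_getElem hmlen] at hs1; exact Option.some.inj hs1
        rw [pvA_at_cm cs m hmlen hcm' hs2]
      next hcm =>
        -- a quote is earliest
        have hq : pvFindCh '\'' (cs.drop pos) pos = some m ∨ pvFindCh '"' (cs.drop pos) pos = some m := by
          rcases pvMin_mem hm with h | h | h
          · exact Or.inl h
          · exact Or.inr h
          · exact absurd h hcm
        rcases hq with hsq | hdq
        · -- single quote
          obtain ⟨-, hmlen, hchr, -⟩ := pvFindChA_some hsq
          have hch : cs[m] = '\'' := by
            rw [List.getElem?_eq_getElem hmlen] at hchr; exact Option.some.inj hchr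
          rw [pvA_at_sq cs m hmlen hch,
              pvA_sq (cs.length - (m+1)) cs (m+1) (le_refl _), if_pos hsq]
          split
          next he => rfl
          next e he =>
            have hsp := pvFindChA_some he
            exact ih cs (e+1) (by omega)
        · -- double quote; the single-quote find cannot also point at m
          have hnsq : ¬ pvFindCh '\'' (cs.drop pos) pos = some m := by
            intro h
            obtain ⟨-, hmlen, hchr, -⟩ := pvFindChA_some h
            obtain ⟨-, -, hchr2, -⟩ := pvFindChA_some hdq
            rw [hchr] at hchr2
            exact absurd (Option.some.inj hchr2) (by decide)
          obtain ⟨-, hmlen, hchr, -⟩ := pvFindChA_some hdq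
          have hch : cs[m] = '"' := by
            rw [List.getElem?_eq_getElem hmlen] at hchr; exact Option.some.inj hchr
          rw [pvA_at_dq cs m hmlen hch,
              pvA_dq (cs.length - (m+1)) cs (m+1) (le_refl _), if_neg hnsq]
          split
          next he => rfl
          next e he =>
            have hsp := pvFindChA_some he
            exact ih cs (e+1) (by omega)

-- ===== VERDICT (by name: the statement is the Claim_ definition above) =====
theorem strip_trailing_line_comments_py_spec : Claim_equal_strip_trailing_line_comments_py := by
  intro line _
  unfold Spec_strip_trailing_line_comments_py strip_trailing_line_comments_py strip_trailing_line_comments_py_alt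
  unfold pvStripBLoop
  rw [pvB_eq_A (line.toList.length + 1) line.toList 0 (by omega), List.drop_zero]
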